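-- pv_equiv track=rewrite | github.com/amazon-science/generalized-fairness-metrics | checklist_fork/checklist/tests/helpers.py | get_data_for_many_groups
-- ===== SOURCE A (Python) =====
-- def get_data_for_many_groups(
--         orig_labels, orig_preds, orig_confs, orig_meta, gindex_to_skip=None):
--     new_labels, new_preds, new_confs, new_meta = [], [], [], []
--
--     for gindex, (labels, preds, confs, meta) in enumerate(zip(
--             orig_labels, orig_preds, orig_confs, orig_meta)):
--         if gindex_to_skip is not None and gindex == gindex_to_skip:
--             continue
--
--         new_labels += [x for x in labels]
--         new_preds += [x for x in preds]
--         new_confs += [x for x in confs]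
--         new_meta += [x for x in meta]
--     return new_labels, new_preds, new_confs, new_meta
-- ===== SOURCE B (Python) =====
-- def get_data_for_many_groups(
--         orig_labels, orig_preds, orig_confs, orig_meta, gindex_to_skip=None):
--     # Number of groups actually visited (zip truncates to the shortest input).
--     k = min(len(orig_labels), len(orig_preds), len(orig_confs), len(orig_meta))
--
--     def flatten(groups):
--         kept = groups[:k]
--         if gindex_to_skip is not None and 0 <= gindex_to_skip < k:
--             kept = kept[:gindex_to_skip] + kept[gindex_to_skip + 1:]
--         out = []
--         for g in kept:
--             out += g
--         return out
--
--     return (flatten(orig_labels), flatten(orig_preds),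
--             flatten(orig_confs), flatten(orig_meta))
-- ===== Notes on version B (the rewrite author's own statement) =====
-- stated objective: alternative
-- what changed: Instead of zipping the four inputs and running one interleaved loop with a per-group index test, B computes the common truncation length once and processes each of the four lists independently: truncate by slicing, delete the skipped group by index slicing (no per-group comparison), and flatten.
import Mathlib
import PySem

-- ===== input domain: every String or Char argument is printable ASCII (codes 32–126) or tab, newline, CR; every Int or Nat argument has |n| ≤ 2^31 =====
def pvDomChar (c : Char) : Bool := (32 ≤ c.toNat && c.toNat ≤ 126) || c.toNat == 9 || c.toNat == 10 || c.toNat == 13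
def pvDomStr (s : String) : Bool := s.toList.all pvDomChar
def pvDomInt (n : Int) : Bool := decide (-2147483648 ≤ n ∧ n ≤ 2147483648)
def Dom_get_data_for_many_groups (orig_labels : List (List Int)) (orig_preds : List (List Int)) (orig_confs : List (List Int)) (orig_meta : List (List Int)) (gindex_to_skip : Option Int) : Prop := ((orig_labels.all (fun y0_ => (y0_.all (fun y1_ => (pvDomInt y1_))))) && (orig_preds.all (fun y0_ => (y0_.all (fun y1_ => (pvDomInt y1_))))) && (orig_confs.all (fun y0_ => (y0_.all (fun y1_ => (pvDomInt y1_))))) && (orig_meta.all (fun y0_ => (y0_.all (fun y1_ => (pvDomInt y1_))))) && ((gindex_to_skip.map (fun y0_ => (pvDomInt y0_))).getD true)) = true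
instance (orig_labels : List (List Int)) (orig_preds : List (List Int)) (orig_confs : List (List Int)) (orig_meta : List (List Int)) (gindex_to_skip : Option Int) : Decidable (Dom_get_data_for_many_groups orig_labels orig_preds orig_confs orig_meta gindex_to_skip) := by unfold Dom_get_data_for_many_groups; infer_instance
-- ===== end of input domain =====

-- ===== PORT A =====
-- B replaces A's zip + interleaved accumulating loop with a per-list scheme:
-- compute the common truncation length once, then truncate each of the four lists,
-- delete the skipped group by index slicing, and flatten (objective: alternative).

-- Python zip over the four lists (truncates to the shortest)
def pvZip4 : List (List Int) → List (List Int) → List (List Int) → List (List Int) →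
    List (List Int × List Int × List Int × List Int)
  | a :: as, b :: bs, c :: cs, d :: ds => (a, b, c, d) :: pvZip4 as bs cs ds
  | _, _, _, _ => []

def get_data_for_many_groups (orig_labels : List (List Int)) (orig_preds : List (List Int)) (orig_confs : List (List Int)) (orig_meta : List (List Int)) (gindex_to_skip : Option Int) : List Int × List Int × List Int × List Int :=
  (PySem.List.enumerate (pvZip4 orig_labels orig_preds orig_confs orig_meta)).foldl
    (fun acc p =>
      if gindex_to_skip.isSome && (p.1 == gindex_to_skip.getD 0) then acc
      else (acc.1 ++ p.2.1, acc.2.1 ++ p.2.2.1, acc.2.2.1 ++ p.2.2.2.1, acc.2.2.2 ++ p.2.2.2.2))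
    ([], [], [], [])

-- ===== PORT B =====
-- Source B's flatten helper: groups[:k] is 'take k' (0 ≤ k ≤ len, exact);
-- kept[:s] + kept[s+1:] with 0 ≤ s is 'take s.toNat ++ drop (s.toNat+1)' (exact);
-- 'out += g' loop is a foldl with '++'.
def pvFlattenB (k : Nat) (skip : Option Int) (groups : List (List Int)) : List Int :=
  let kept := groups.take k
  let kept2 := match skip with
    | some s => if 0 ≤ s ∧ s < (k : Int) then kept.take s.toNat ++ kept.drop (s.toNat + 1) else kept
    | none => kept
  kept2.foldl (fun out g => out ++ g) []

def get_data_for_many_groups_alt (orig_labels : List (List Int)) (orig_preds : List (List Int)) (orig_confs : List (List Int)) (orig_meta : List (List Int)) (gindex_to_skip : Option Int) : List Int × List Int × List Int × List Int :=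
  let k := min (min (min orig_labels.length orig_preds.length) orig_confs.length) orig_meta.length
  (pvFlattenB k gindex_to_skip orig_labels, pvFlattenB k gindex_to_skip orig_preds,
   pvFlattenB k gindex_to_skip orig_confs, pvFlattenB k gindex_to_skip orig_meta)

-- ===== PRECONDITION & SPEC =====
def Spec_get_data_for_many_groups (orig_labels : List (List Int)) (orig_preds : List (List Int)) (orig_confs : List (List Int)) (orig_meta : List (List Int)) (gindex_to_skip : Option Int) (out : List Int × List Int × List Int × List Int) : Prop := out = get_data_for_many_groups_alt orig_labels orig_preds orig_confs orig_meta gindex_to_skip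
instance (orig_labels : List (List Int)) (orig_preds : List (List Int)) (orig_confs : List (List Int)) (orig_meta : List (List Int)) (gindex_to_skip : Option Int) (out : List Int × List Int × List Int × List Int) : Decidable (Spec_get_data_for_many_groups orig_labels orig_preds orig_confs orig_meta gindex_to_skip out) := by unfold Spec_get_data_for_many_groups; infer_instance

-- ===== CLAIM (what is proved, stated in full; the proofs are below) =====
def Claim_equal_get_data_for_many_groups : Prop := ∀ (orig_labels : List (List Int)) (orig_preds : List (List Int)) (orig_confs : List (List Int)) (orig_meta : List (List Int)) (gindex_to_skip : Option Int), Dom_get_data_for_many_groups orig_labels orig_preds orig_confs orig_meta gindex_to_skip → Spec_get_data_for_many_groups orig_labels orig_preds orig_confs orig_meta gindex_to_skip (get_data_for_many_groups orig_labels orig_preds orig_confs orig_meta gindex_to_skip)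

-- ===== LEMMAS AND PROOFS =====

-- A's fold from any accumulator = accumulator ++ flattened projections of the kept groups.
theorem pv_fold_eq (g : Option Int)
    (L : List (Int × (List Int × List Int × List Int × List Int)))
    (acc : List Int × List Int × List Int × List Int) :
    L.foldl
      (fun acc p =>
        if g.isSome && (p.1 == g.getD 0) then acc
        else (acc.1 ++ p.2.1, acc.2.1 ++ p.2.2.1, acc.2.2.1 ++ p.2.2.2.1, acc.2.2.2 ++ p.2.2.2.2))
      acc =
    (let ks := (L.filter (fun p => g.isNone || !(p.1 == g.getD 0))).map Prod.snd
     (acc.1 ++ ks.flatMap (fun h => h.1), acc.2.1 ++ ks.flatMap (fun h => h.2.1),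
      acc.2.2.1 ++ ks.flatMap (fun h => h.2.2.1), acc.2.2.2 ++ ks.flatMap (fun h => h.2.2.2))) := by
  induction L generalizing acc with
  | nil => simp
  | cons p L ih =>
    obtain ⟨a1, a2, a3, a4⟩ := acc
    simp only [List.foldl_cons, List.filter_cons]
    by_cases h : (g.isSome && (p.1 == g.getD 0)) = true
    · have h' : (g.isNone || !(p.1 == g.getD 0)) = false := by
        cases g <;> simp_all
      rw [if_pos h, ih]
      simp [h']
    · have h' : (g.isNone || !(p.1 == g.getD 0)) = true := by
        cases g <;> simp_all
      rw [if_neg h, ih]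
      simp [h']

-- projections of the zip are the truncations of the inputs
theorem pvZip4_map_fst (a b c d : List (List Int)) :
    (pvZip4 a b c d).map (fun h => h.1) =
      a.take (min (min (min a.length b.length) c.length) d.length) := by
  induction a generalizing b c d with
  | nil => simp [pvZip4]
  | cons x as ih =>
    cases b with
    | nil => simp [pvZip4]
    | cons y bs =>
      cases c with
      | nil => simp [pvZip4]
      | cons z cs =>
        cases d with
        | nil => simp [pvZip4]
        | cons w ds => simp [pvZip4, ih, Nat.succ_min_succ]

theorem pvZip4_map_snd1 (a b c d : List (List Int)) :
    (pvZip4 a b c d).map (fun h => h.2.1) =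
      b.take (min (min (min a.length b.length) c.length) d.length) := by
  induction a generalizing b c d with
  | nil => simp [pvZip4]
  | cons x as ih =>
    cases b with
    | nil => simp [pvZip4]
    | cons y bs =>
      cases c with
      | nil => simp [pvZip4]
      | cons z cs =>
        cases d with
        | nil => simp [pvZip4]
        | cons w ds => simp [pvZip4, ih, Nat.succ_min_succ]

theorem pvZip4_map_snd2 (a b c d : List (List Int)) :
    (pvZip4 a b c d).map (fun h => h.2.2.1) =
      c.take (min (min (min a.length b.length) c.length) d.length) := by
  induction a generalizing b c d with
  | nil => simp [pvZip4]
  | cons x as ih =>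
    cases b with
    | nil => simp [pvZip4]
    | cons y bs =>
      cases c with
      | nil => simp [pvZip4]
      | cons z cs =>
        cases d with
        | nil => simp [pvZip4]
        | cons w ds => simp [pvZip4, ih, Nat.succ_min_succ]

theorem pvZip4_map_snd3 (a b c d : List (List Int)) :
    (pvZip4 a b c d).map (fun h => h.2.2.2) =
      d.take (min (min (min a.length b.length) c.length) d.length) := by
  induction a generalizing b c d with
  | nil => simp [pvZip4]
  | cons x as ih =>
    cases b with
    | nil => simp [pvZip4]
    | cons y bs =>
      cases c with
      | nil => simp [pvZip4]
      | cons z cs =>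
        cases d with
        | nil => simp [pvZip4]
        | cons w ds => simp [pvZip4, ih, Nat.succ_min_succ]

-- filtering by an index-only predicate commutes with projecting the payload
theorem pv_enum_filter_map {α β : Type} (f : α → β) (q : Int → Bool) (L : List α) (s : Int) :
    ((PySem.List.enumerate L s).filter (fun p => q p.1)).map (fun p => f p.2)
      = ((PySem.List.enumerate (L.map f) s).filter (fun p => q p.1)).map Prod.snd := by
  induction L generalizing s with
  | nil => simp [PySem.List.enumerate_nil]
  | cons x L ih =>
    simp only [List.map_cons, PySem.List.enumerate_cons, List.filter_cons]
    by_cases h : q s = true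
    · simp [h, ih]
    · simp [h, ih]

-- deleting the index s from an enumeration = take/drop around it (or nothing if out of range)
theorem pv_erase_enum {α : Type} (L : List α) (s start : Int) :
    (((PySem.List.enumerate L start).filter (fun p => !(p.1 == s))).map Prod.snd)
      = if start ≤ s ∧ s < start + L.length
        then L.take (s - start).toNat ++ L.drop ((s - start).toNat + 1)
        else L := by
  induction L generalizing start with
  | nil =>
    simp only [PySem.List.enumerate_nil, List.filter_nil, List.map_nil, List.length_nil]
    rw [if_neg (by omega)]
  | cons x L ih =>
    simp only [PySem.List.enumerate_cons, List.filter_cons, List.length_cons]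
    by_cases h : start = s
    · subst h
      have hrest := ih (start + 1)
      rw [if_neg (by omega)] at hrest
      have hc : start ≤ start ∧ start < start + ((L.length + 1 : Nat) : Int) := by
        push_cast; omega
      rw [if_pos hc]
      simp [hrest]
    · rw [if_pos (by simp [h])]
      simp only [List.map_cons, ih (start + 1)]
      by_cases hin : start + 1 ≤ s ∧ s < start + 1 + (L.length : Int)
      · rw [if_pos hin, if_pos (by push_cast at hin ⊢; omega)]
        have hs : (s - start).toNat = (s - (start + 1)).toNat + 1 := by omega
        rw [hs]
        simp
      · rw [if_neg hin, if_neg (by push_cast at hin ⊢; omega)]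

theorem pv_flatten_foldl (L : List (List Int)) (acc : List Int) :
    L.foldl (fun out g => out ++ g) acc = acc ++ L.flatten := by
  induction L generalizing acc with
  | nil => simp
  | cons x L ih => simp [ih, List.append_assoc]

-- one component of A's result equals pvFlattenB, given the zip-projection fact
theorem pv_component (groups : List (List Int))
    (Z : List (List Int × List Int × List Int × List Int))
    (proj : List Int × List Int × List Int × List Int → List Int)
    (skip : Option Int) (k : Nat)
    (hZ : Z.map proj = groups.take k) (hk : k ≤ groups.length) :
    (((PySem.List.enumerate Z).filter
        (fun p => skip.isNone || !(p.1 == skip.getD 0))).map Prod.snd).flatMap proj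
      = pvFlattenB k skip groups := by
  have hlen : (groups.take k).length = k := by simp [hk]
  have key : (((PySem.List.enumerate Z).filter
        (fun p => skip.isNone || !(p.1 == skip.getD 0))).map Prod.snd).map proj
      = (match skip with
         | some s => if 0 ≤ s ∧ s < (k : Int)
             then (groups.take k).take s.toNat ++ (groups.take k).drop (s.toNat + 1)
             else groups.take k
         | none => groups.take k) := by
    have hmm : (((PySem.List.enumerate Z).filter
          (fun p => skip.isNone || !(p.1 == skip.getD 0))).map Prod.snd).map proj
        = ((PySem.List.enumerate Z).filter
          (fun p => skip.isNone || !(p.1 == skip.getD 0))).map (fun p => proj p.2) := by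
      simp
    rw [hmm, pv_enum_filter_map proj (fun i => skip.isNone || !(i == skip.getD 0)) Z 0, hZ]
    cases skip with
    | none => simp [PySem.List.map_snd_enumerate]
    | some s =>
      simp only [Option.isNone_some, Bool.false_or, Option.getD_some]
      rw [pv_erase_enum (groups.take k) s 0]
      simp only [hlen, Int.zero_add, Int.sub_zero]
  calc (((PySem.List.enumerate Z).filter
        (fun p => skip.isNone || !(p.1 == skip.getD 0))).map Prod.snd).flatMap proj
      = ((((PySem.List.enumerate Z).filter
        (fun p => skip.isNone || !(p.1 == skip.getD 0))).map Prod.snd).map proj).flatten := by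
        simp [List.flatMap_def]
    _ = pvFlattenB k skip groups := by
        rw [key]
        unfold pvFlattenB
        cases skip with
        | none => simp [pv_flatten_foldl]
        | some s => simp [pv_flatten_foldl]

-- ===== VERDICT (by name: the statement is the Claim_ definition above) =====
theorem get_data_for_many_groups_spec : Claim_equal_get_data_for_many_groups := by
  intro orig_labels orig_preds orig_confs orig_meta gindex_to_skip _
  unfold Spec_get_data_for_many_groups get_data_for_many_groups get_data_for_many_groups_alt
  rw [pv_fold_eq]
  simp only [List.nil_append]
  refine Prod.ext ?_ (Prod.ext ?_ (Prod.ext ?_ ?_)) <;>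
    simp only []
  · exact pv_component orig_labels _ _ gindex_to_skip _
      (pvZip4_map_fst orig_labels orig_preds orig_confs orig_meta) (by omega)
  · exact pv_component orig_preds _ _ gindex_to_skip _
      (pvZip4_map_snd1 orig_labels orig_preds orig_confs orig_meta) (by omega)
  · exact pv_component orig_confs _ _ gindex_to_skip _
      (pvZip4_map_snd2 orig_labels orig_preds orig_confs orig_meta) (by omega)
  · exact pv_component orig_meta _ _ gindex_to_skip _
      (pvZip4_map_snd3 orig_labels orig_preds orig_confs orig_meta) (by omega)
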